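-- pv_equiv track=rewrite | github.com/NgDinhKhiem/TicTacToeAI | ML/api.py | parse_board_matrix_ml
-- ===== SOURCE A (Python) =====
-- def parse_board_matrix_ml(matrix: str, board_size: int):
--     """
--     Parse board matrix string to 2D list
--
--     Args:
--         matrix: String representation of board
--         board_size: Size of the board
--
--     Returns:
--         2D list representing the board
--     """
--     # Remove whitespace
--     matrix = matrix.replace(' ', '').replace('\n', '').replace('\r', '')
--
--     # Handle different formats
--     if ',' in matrix:
--         values = matrix.split(',')
--     elif '|' in matrix:
--         values = matrix.split('|')
--     else:
--         # Single string, split by character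
--         values = list(matrix)
--
--     board_2d = []
--     for i in range(board_size):
--         row = []
--         for j in range(board_size):
--             idx = i * board_size + j
--             if idx < len(values):
--                 char = values[idx].upper()
--                 if char == 'X':
--                     row.append('X')
--                 elif char == 'O':
--                     row.append('O')
--                 else:
--                     row.append('-')
--             else:
--                 row.append('-')
--         board_2d.append(row)
--
--     return board_2d
-- ===== SOURCE B (Python) =====
-- def parse_board_matrix_ml(matrix: str, board_size: int):
--     # Stream-consuming decomposition: peel board_size tokens off the front of the
--     # token list per row, normalize and pad each row independently; no index math.
--     matrix = matrix.replace(' ', '').replace('\n', '').replace('\r', '')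
--     if ',' in matrix:
--         values = matrix.split(',')
--     elif '|' in matrix:
--         values = matrix.split('|')
--     else:
--         values = list(matrix)
--
--     def cell(v):
--         c = v.upper()
--         return c if c in ('X', 'O') else '-'
--
--     board = []
--     rest = values[:board_size * board_size]  # extras beyond the board are never used
--     remaining = board_size
--     while remaining > 0:
--         head, rest = rest[:board_size], rest[board_size:]
--         board.append([cell(v) for v in head] + ['-'] * (board_size - len(head)))
--         remaining -= 1
--     return board
-- ===== Notes on version B (the rewrite author's own statement) =====
-- stated objective: alternative
-- what changed: Replaces A's nested i,j loops with per-cell flat-index arithmetic (idx = i*board_size+j) and an in-bounds test by a stream-consuming loop that peels the next board_size tokens off the front of the token list for each row and pads that row independently.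
import Mathlib
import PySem

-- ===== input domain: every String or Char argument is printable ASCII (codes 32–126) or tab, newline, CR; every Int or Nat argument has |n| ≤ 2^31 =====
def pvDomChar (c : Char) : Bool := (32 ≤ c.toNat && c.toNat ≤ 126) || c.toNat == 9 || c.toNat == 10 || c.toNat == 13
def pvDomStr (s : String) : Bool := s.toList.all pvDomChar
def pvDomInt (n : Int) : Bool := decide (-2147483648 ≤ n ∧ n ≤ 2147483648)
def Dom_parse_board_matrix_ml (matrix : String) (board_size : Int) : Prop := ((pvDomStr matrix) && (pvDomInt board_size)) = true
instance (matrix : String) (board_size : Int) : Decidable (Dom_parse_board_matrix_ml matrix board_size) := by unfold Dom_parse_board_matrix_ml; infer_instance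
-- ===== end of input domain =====

-- B replaces A's nested i,j loops with flat-index arithmetic (idx = i*bs+j, in-bounds test)
-- by a stream-consuming loop: peel the next board_size tokens off the token list per row,
-- normalize and pad each row independently (alternative decomposition; not faster).

-- ===== PORT A =====
-- the cell value A appends for flat index idx (the body of A's inner loop)
def pvCellA (values : List (List Char)) (idx : Int) : String :=
  if idx < (values.length : Int) then
    let ch := PySem.Chars.upper (PySem.List.pyGetD values idx [])
    if ch = ['X'] then "X" else if ch = ['O'] then "O" else "-"
  else "-"

def parse_board_matrix_ml (matrix : String) (board_size : Int) : List (List String) :=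
  let m := PySem.Chars.replace (PySem.Chars.replace (PySem.Chars.replace matrix.toList [' '] []) ['\n'] []) ['\r'] []
  let values : List (List Char) :=
    if PySem.Chars.isIn [','] m then PySem.Chars.splitOn m [',']
    else if PySem.Chars.isIn ['|'] m then PySem.Chars.splitOn m ['|']
    else m.map (fun c => [c])
  (PySem.List.pyRange 0 board_size 1).foldl (fun board i =>
    board ++ [(PySem.List.pyRange 0 board_size 1).foldl (fun row j =>
      row ++ [pvCellA values (i * board_size + j)]) []]) []

-- ===== PORT B =====
-- B's cell helper: c = v.upper(); c if c in ('X','O') else '-'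
def pvCellB (v : List Char) : String :=
  let c := PySem.Chars.upper v
  if c = ['X'] ∨ c = ['O'] then String.ofList c else "-"

-- B's while loop: remaining counts down, rest is consumed board_size tokens at a time
def pvBuild (bs : Int) : Nat → List (List Char) → List (List String)
  | 0, _ => []
  | k + 1, rest =>
    let head := PySem.List.slice rest none (some bs)
    let tail := PySem.List.slice rest (some bs) none
    (head.map pvCellB ++ List.replicate (bs - (head.length : Int)).toNat "-") :: pvBuild bs k tail

def parse_board_matrix_ml_alt (matrix : String) (board_size : Int) : List (List String) :=
  let m := PySem.Chars.replace (PySem.Chars.replace (PySem.Chars.replace matrix.toList [' '] []) ['\n'] []) ['\r'] []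
  let values : List (List Char) :=
    if PySem.Chars.isIn [','] m then PySem.Chars.splitOn m [',']
    else if PySem.Chars.isIn ['|'] m then PySem.Chars.splitOn m ['|']
    else m.map (fun c => [c])
  -- extras beyond the board are never used: drop them once, then peel per row
  pvBuild board_size board_size.toNat (PySem.List.slice values none (some (board_size * board_size)))

-- ===== PRECONDITION & SPEC =====
def Spec_parse_board_matrix_ml (matrix : String) (board_size : Int) (out : List (List String)) : Prop := out = parse_board_matrix_ml_alt matrix board_size
instance (matrix : String) (board_size : Int) (out : List (List String)) : Decidable (Spec_parse_board_matrix_ml matrix board_size out) := by unfold Spec_parse_board_matrix_ml; infer_instance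

-- ===== CLAIM =====
def Claim_equal_parse_board_matrix_ml : Prop := ∀ (matrix : String) (board_size : Int), Dom_parse_board_matrix_ml matrix board_size → Spec_parse_board_matrix_ml matrix board_size (parse_board_matrix_ml matrix board_size)

-- ===== LEMMAS AND PROOFS =====

-- A-style cell on a token already in hand
def pvF (v : List Char) : String :=
  let c := PySem.Chars.upper v
  if c = ['X'] then "X" else if c = ['O'] then "O" else "-"

theorem pvCellB_eq_pvF (v : List Char) : pvCellB v = pvF v := by
  unfold pvCellB pvF
  by_cases h1 : PySem.Chars.upper v = ['X']
  · simp [h1]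
  · by_cases h2 : PySem.Chars.upper v = ['O']
    · simp [h2]
    · simp [h1, h2]

-- canonical form of one row: cells at flat indices r*t .. r*t+t-1
def pvRowAt (vs : List (List Char)) (t r : Nat) : List String :=
  (List.range t).map (fun j => if r * t + j < vs.length then pvF (vs.getD (r * t + j) []) else "-")

theorem pvFlat_eq (vs : List (List Char)) (t : Nat) :
    (vs.take t).map pvF ++ List.replicate (t - min t vs.length) "-"
      = (List.range t).map (fun k => if k < vs.length then pvF (vs.getD k []) else "-") := by
  apply List.ext_getElem
  · simp
  · intro k h1 h2
    simp only [List.length_append, List.length_map, List.length_take, List.length_replicate] at h1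
    simp only [List.length_map, List.length_range] at h2
    rw [List.getElem_map, List.getElem_range]
    by_cases hk : k < min t vs.length
    · rw [List.getElem_append_left (by simpa using hk)]
      rw [List.getElem_map, List.getElem_take]
      rw [if_pos (by omega)]
      congr 1
      exact (List.getD_eq_getElem vs [] (by omega)).symm
    · rw [List.getElem_append_right (by simp; omega)]
      rw [List.getElem_replicate]
      rw [if_neg (by omega)]

theorem pvRowAt_drop (vs : List (List Char)) (t r : Nat) :
    pvRowAt (vs.drop t) t r = pvRowAt vs t (r + 1) := by
  unfold pvRowAt
  apply List.map_congr_left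
  intro j hj
  rw [List.mem_range] at hj
  have hlen : (vs.drop t).length = vs.length - t := by simp
  have hidx : (r + 1) * t + j = t + (r * t + j) := by ring
  rw [hidx]
  by_cases h : r * t + j < vs.length - t
  · rw [if_pos (by omega), if_pos (by omega)]
    congr 1
    rw [List.getD_eq_getElem?_getD, List.getD_eq_getElem?_getD, List.getElem?_drop]
  · rw [if_neg (by omega), if_neg (by omega)]

theorem pvBuild_eq (bs : Int) (hbs : 0 ≤ bs) (n : Nat) (vs : List (List Char)) :
    pvBuild bs n vs = (List.range n).map (fun r => pvRowAt vs bs.toNat r) := by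
  induction n generalizing vs with
  | zero => rfl
  | succ k ih =>
    rw [pvBuild]
    rw [List.range_succ_eq_map, List.map_cons, List.map_map]
    congr 1
    · -- head row
      rw [PySem.List.slice_to (hb := hbs)]
      simp only [List.length_take]
      have hrep : (bs - ((min bs.toNat vs.length : Nat) : Int)).toNat
          = bs.toNat - min bs.toNat vs.length := by omega
      rw [hrep]
      have hmap : (vs.take bs.toNat).map pvCellB = (vs.take bs.toNat).map pvF := by
        apply List.map_congr_left; intro v _; exact pvCellB_eq_pvF v
      rw [hmap, pvFlat_eq]
      unfold pvRowAt
      simp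
    · -- tail rows
      rw [PySem.List.slice_from (ha := hbs), ih]
      apply List.map_congr_left
      intro r _
      exact pvRowAt_drop vs bs.toNat r

theorem pvA_eq (vs : List (List Char)) (bs : Int) (hbs : 0 ≤ bs) :
    (PySem.List.pyRange 0 bs 1).foldl (fun board i =>
      board ++ [(PySem.List.pyRange 0 bs 1).foldl (fun row j =>
        row ++ [pvCellA vs (i * bs + j)]) []]) []
    = (List.range bs.toNat).map (fun r => pvRowAt vs bs.toNat r) := by
  obtain ⟨t, rfl⟩ : ∃ t : Nat, bs = (t : Int) := ⟨bs.toNat, by omega⟩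
  simp only [Int.toNat_natCast]
  rw [PySem.List.foldl_append_singleton_eq_map, PySem.List.pyRange_one]
  simp only [sub_zero, Int.toNat_natCast, List.map_map]
  apply List.map_congr_left
  intro r hr
  rw [List.mem_range] at hr
  simp only [Function.comp]
  rw [PySem.List.foldl_append_singleton_eq_map]
  simp only [List.nil_append, List.map_map]
  unfold pvRowAt
  apply List.map_congr_left
  intro k hk
  rw [List.mem_range] at hk
  simp only [Function.comp]
  have hidx : (0 + (r : Int)) * (t : Int) + (0 + (k : Int)) = ((r * t + k : Nat) : Int) := by
    push_cast; ring
  rw [hidx]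
  unfold pvCellA pvF
  rw [PySem.List.pyGetD_natCast]
  simp only [Nat.cast_lt]

theorem pvRowAt_take (vs : List (List Char)) (t N r : Nat) (h : (r + 1) * t ≤ N) :
    pvRowAt (vs.take N) t r = pvRowAt vs t r := by
  unfold pvRowAt
  apply List.map_congr_left
  intro j hj
  rw [List.mem_range] at hj
  have hidx : r * t + j < N := by nlinarith
  have hlen : (vs.take N).length = min N vs.length := by simp
  by_cases hl : r * t + j < vs.length
  · rw [if_pos (by omega), if_pos hl]
    congr 1
    rw [List.getD_eq_getElem?_getD, List.getD_eq_getElem?_getD]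
    congr 1
    simp [hidx]
  · rw [if_neg (by omega), if_neg hl]

theorem pv_main (matrix : String) (board_size : Int) :
    parse_board_matrix_ml matrix board_size = parse_board_matrix_ml_alt matrix board_size := by
  unfold parse_board_matrix_ml parse_board_matrix_ml_alt
  by_cases hbs : board_size ≤ 0
  · rw [PySem.List.pyRange_one_eq_nil hbs]
    have : board_size.toNat = 0 := by omega
    rw [this]
    rfl
  · rw [pvA_eq _ board_size (by omega), pvBuild_eq board_size (by omega),
        PySem.List.slice_to (hb := mul_nonneg (by omega) (by omega))]
    have hNN : (board_size * board_size).toNat = board_size.toNat * board_size.toNat := by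
      rw [Int.toNat_mul (by omega) (by omega)]
    rw [hNN]
    apply List.map_congr_left
    intro r hr
    rw [List.mem_range] at hr
    exact (pvRowAt_take _ _ _ _ (Nat.mul_le_mul_right _ (by omega))).symm

-- ===== VERDICT =====
theorem parse_board_matrix_ml_spec : Claim_equal_parse_board_matrix_ml := by
  intro matrix board_size _
  unfold Spec_parse_board_matrix_ml
  exact pv_main matrix board_size
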